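-- pv_equiv track=rewrite | github.com/ovalofficer/LookupMaster | helpers.py | clean_phone_number
-- ===== SOURCE A (Python) =====
-- def letter_to_number(letter):
--     # T9 letter to number dict
--     ltn = {'abc': 2,
--            'def': 3,
--            'ghi': 4,
--            'jkl': 5,
--            'mno': 6,
--            'pqrs': 7,
--            'tuv': 8,
--            'wxyz': 9}
--
--     for letters, number in ltn.items():
--         if letter.lower() in letters:
--             return str(number)
--
-- def remove_non_digits(num: str):
--     return ''.join(c for c in num if c.isdigit())
--
-- def clean_phone_number(num: str):
--     # converts all letters to numbers and then removes non-digits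
--     result = ''
--     for n in num:
--         if n.isalpha():
--             result += letter_to_number(n) or ''
--         else:
--             result += n
--
--     return remove_non_digits(result)
-- ===== SOURCE B (Python) =====
-- # One str.translate call over a complete 62-entry codepoint table (letters->T9 digit,
-- # digits->themselves, everything unmapped deleted) instead of an explicit per-char loop.
-- class _T9Table(dict):
--     def __missing__(self, key):
--         return None  # translate deletes any character without a mapping
--
-- _T9 = _T9Table()
-- _DIGITS = '22233344455566677778889999'
-- for _i, _c in enumerate('abcdefghijklmnopqrstuvwxyz'):
--     _T9[ord(_c)] = _DIGITS[_i]
--     _T9[ord(_c.upper())] = _DIGITS[_i]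
-- for _c in '0123456789':
--     _T9[ord(_c)] = _c
--
-- def clean_phone_number(num: str):
--     return num.translate(_T9)
-- ===== Notes on version B (the rewrite author's own statement) =====
-- stated objective: faster
-- what changed: Replaces A's two-stage pipeline (explicit loop appending every char, converting letters via a per-letter substring scan of the grouped T9 dict, then a second pass filtering out non-digits) with a single str.translate call over a precomputed complete codepoint table that maps letters to their digit, keeps digits, and deletes every unmapped character.
import Mathlib
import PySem

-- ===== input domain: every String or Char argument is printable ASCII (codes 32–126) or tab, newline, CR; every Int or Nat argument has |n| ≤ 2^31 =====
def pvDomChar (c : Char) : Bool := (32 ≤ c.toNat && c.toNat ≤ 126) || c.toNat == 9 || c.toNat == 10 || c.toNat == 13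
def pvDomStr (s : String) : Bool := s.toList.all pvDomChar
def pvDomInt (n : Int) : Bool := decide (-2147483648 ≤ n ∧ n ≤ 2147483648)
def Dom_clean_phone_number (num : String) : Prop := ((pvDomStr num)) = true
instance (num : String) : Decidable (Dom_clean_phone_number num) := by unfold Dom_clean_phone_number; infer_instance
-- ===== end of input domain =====

-- B: a single translate-style pass — one complete 62-entry codepoint table (letters→T9 digit,
-- digits→themselves, everything else deleted) applied by str.translate / filterMap, replacing A's
-- build-then-filter pipeline with its per-letter substring scan of the grouped dict.


-- ===== PORT A =====
-- the T9 grouped dict, in insertion order (items of ltn)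
def pvLtnItems : List (List Char × Int) :=
  [("abc".toList, 2), ("def".toList, 3), ("ghi".toList, 4), ("jkl".toList, 5),
   ("mno".toList, 6), ("pqrs".toList, 7), ("tuv".toList, 8), ("wxyz".toList, 9)]

-- the 'for letters, number in ltn.items(): if letter.lower() in letters: return str(number)' loop
def pvLtnGo (items : List (List Char × Int)) (letter : Char) : Option (List Char) :=
  match items with
  | [] => none
  | (letters, number) :: rest =>
      if PySem.Chars.isIn [PySem.Chars.lowerChar letter] letters then
        some (PySem.Int.toChars number)
      else pvLtnGo rest letter

def letter_to_number (letter : Char) : Option (List Char) := pvLtnGo pvLtnItems letter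

-- clean_phone_number: build 'result' char by char, then remove_non_digits (= keep isdigit chars)
def clean_phone_number (num : String) : String :=
  let result := num.toList.foldl
    (fun acc n =>
      if PySem.Chars.isalpha n then acc ++ ((letter_to_number n).getD [])
      else acc ++ [n]) []
  String.mk (result.filter PySem.Chars.isdigit)

-- ===== PORT B =====
-- the complete translate table _T9 of Source B (keys are the 62 mapped characters, in insertion order;
-- Python keys the dict by ord(c), which is in bijection with the Char keys used here)
def pvT9Table : PySem.Dict Char Char :=
  PySem.Dict.mk
    [('a', '2'), ('A', '2'), ('b', '2'), ('B', '2'), ('c', '2'), ('C', '2'),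
     ('d', '3'), ('D', '3'), ('e', '3'), ('E', '3'), ('f', '3'), ('F', '3'),
     ('g', '4'), ('G', '4'), ('h', '4'), ('H', '4'), ('i', '4'), ('I', '4'),
     ('j', '5'), ('J', '5'), ('k', '5'), ('K', '5'), ('l', '5'), ('L', '5'),
     ('m', '6'), ('M', '6'), ('n', '6'), ('N', '6'), ('o', '6'), ('O', '6'),
     ('p', '7'), ('P', '7'), ('q', '7'), ('Q', '7'), ('r', '7'), ('R', '7'), ('s', '7'), ('S', '7'),
     ('t', '8'), ('T', '8'), ('u', '8'), ('U', '8'), ('v', '8'), ('V', '8'),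
     ('w', '9'), ('W', '9'), ('x', '9'), ('X', '9'), ('y', '9'), ('Y', '9'), ('z', '9'), ('Z', '9'),
     ('0', '0'), ('1', '1'), ('2', '2'), ('3', '3'), ('4', '4'),
     ('5', '5'), ('6', '6'), ('7', '7'), ('8', '8'), ('9', '9')]

-- num.translate(_T9): each char is replaced by its table entry; a missing key yields None
-- (via __missing__) and None deletes the char — exactly Option.filterMap over the lookup.
def clean_phone_number_alt (num : String) : String :=
  String.mk (num.toList.filterMap pvT9Table.get?)

-- ===== PRECONDITION & SPEC =====
def Spec_clean_phone_number (num : String) (out : String) : Prop := out = clean_phone_number_alt num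
instance (num : String) (out : String) : Decidable (Spec_clean_phone_number num out) := by unfold Spec_clean_phone_number; infer_instance

-- ===== CLAIM (what is proved, stated in full; the proofs are below) =====
def Claim_equal_clean_phone_number : Prop := ∀ (num : String), Dom_clean_phone_number num → Spec_clean_phone_number num (clean_phone_number num)

-- ===== LEMMAS AND PROOFS =====

-- per-character contribution of A (letter conversion followed by the digit filter)
def pvStepA (c : Char) : List Char :=
  (if PySem.Chars.isalpha c then (letter_to_number c).getD [] else [c]).filter PySem.Chars.isdigit

-- per-character contribution of B (the translate-table lookup)
def pvStepB (c : Char) : List Char := (pvT9Table.get? c).toList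

-- on every domain character the two contributions agree (checked over all codes < 127)
theorem pvStep_eq (c : Char) (h : pvDomChar c = true) : pvStepA c = pvStepB c := by
  have hc : c = Char.ofNat c.toNat := (Char.ofNat_toNat c).symm
  have hlt : c.toNat < 127 := by
    simp only [pvDomChar, Bool.or_eq_true, Bool.and_eq_true, decide_eq_true_eq, beq_iff_eq] at h
    omega
  have key : ∀ n < 127, pvStepA (Char.ofNat n) = pvStepB (Char.ofNat n) := by decide
  rw [hc]; exact key c.toNat hlt

theorem pvFilterMap_eq_flatMap (cs : List Char) :
    cs.filterMap pvT9Table.get? = cs.flatMap pvStepB := by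
  induction cs with
  | nil => rfl
  | cons c cs ih =>
    simp only [List.filterMap_cons, List.flatMap_cons, pvStepB, ← ih]
    cases pvT9Table.get? c <;> simp

theorem pvFlatMap_congr (cs : List Char) (h : ∀ c ∈ cs, pvDomChar c = true) :
    cs.flatMap pvStepA = cs.flatMap pvStepB := by
  induction cs with
  | nil => rfl
  | cons c cs ih =>
    simp only [List.flatMap_cons]
    rw [pvStep_eq c (h c (List.mem_cons_self)), ih (fun x hx => h x (List.mem_cons_of_mem _ hx))]

-- ===== VERDICT (by name: the statement is the Claim_ definition above) =====
theorem clean_phone_number_spec : Claim_equal_clean_phone_number := by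
  intro num hdom
  unfold Spec_clean_phone_number clean_phone_number clean_phone_number_alt
  rw [pvFilterMap_eq_flatMap]
  have hA : num.toList.foldl
      (fun acc n =>
        if PySem.Chars.isalpha n then acc ++ ((letter_to_number n).getD [])
        else acc ++ [n]) [] =
      num.toList.flatMap (fun n =>
        if PySem.Chars.isalpha n then (letter_to_number n).getD [] else [n]) := by
    have hfun : (fun (acc : List Char) n =>
        if PySem.Chars.isalpha n then acc ++ ((letter_to_number n).getD [])
        else acc ++ [n]) = fun acc n =>
        acc ++ (if PySem.Chars.isalpha n then (letter_to_number n).getD [] else [n]) := by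
      funext acc n; split <;> rfl
    rw [hfun, PySem.List.foldl_append_eq_flatMap, List.nil_append]
  simp only [hA, List.filter_flatMap, List.nil_append]
  have hmem : ∀ c ∈ num.toList, pvDomChar c = true := by
    simpa [Dom_clean_phone_number, pvDomStr, List.all_eq_true] using hdom
  exact congrArg String.mk (pvFlatMap_congr num.toList hmem)
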